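-- pv_equiv track=rewrite | github.com/ywchanna2001/Competitive-Programming-in-Python | Suffeling.py | shuffle_index
-- ===== SOURCE A (Python) =====
-- def shuffle_index(n, p):
--     """
--     Simulate the shuffling process and find the index of the city after (p-1) shuffles.
--     n: the index of the city to track
--     p: the number of shuffling rounds based on 2^p cities
--     """
--     num_of_shuffles = p - 1
--     size = 2**p
--
--     for _ in range(num_of_shuffles):
--         new_index = 0
--         if n % 2 == 0:
--             new_index = n // 2
--         else:
--             new_index = size // 2 + (n - 1) // 2
--         n = new_index
--
--     return n
-- ===== SOURCE B (Python) =====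
-- def shuffle_index(n, p):
--     """Closed form: p-1 halving rounds on 2^p cities amount to one
--     rotate-left-by-one of the p-bit index, i.e. split n at bit p-1."""
--     if p <= 1:
--         return n
--     half = 1 << (p - 1)
--     return n // half + (n % half) * 2
-- ===== Notes on version B (the rewrite author's own statement) =====
-- stated objective: faster
-- what changed: Replaced the (p-1)-iteration halving loop with the closed-form rotate-left-by-one: n // 2^(p-1) + (n % 2^(p-1)) * 2.
import Mathlib
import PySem

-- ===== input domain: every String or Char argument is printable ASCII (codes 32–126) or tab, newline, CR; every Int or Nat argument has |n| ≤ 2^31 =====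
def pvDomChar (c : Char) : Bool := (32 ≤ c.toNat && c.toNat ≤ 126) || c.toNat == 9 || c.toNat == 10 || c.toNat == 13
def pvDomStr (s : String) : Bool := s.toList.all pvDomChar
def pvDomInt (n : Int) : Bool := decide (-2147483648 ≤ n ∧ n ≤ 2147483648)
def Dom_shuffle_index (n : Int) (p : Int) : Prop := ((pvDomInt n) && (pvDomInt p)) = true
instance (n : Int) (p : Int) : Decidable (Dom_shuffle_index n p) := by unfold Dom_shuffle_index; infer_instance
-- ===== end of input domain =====

-- B replaces A's (p-1)-iteration halving loop by the closed-form rotate-left-by-one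
-- n // 2^(p-1) + (n % 2^(p-1)) * 2 (objective: faster, O(1) arithmetic instead of O(p) iterations).


-- ===== PORT A =====
-- Literal port of the Python loop. Python computes size = 2**p once; for p < 0 that value is a
-- float the (then empty) loop never uses, so the Int power 2 ^ p.toNat is exact wherever used.
-- num_of_shuffles = p - 1 and size = 2**p are inlined; `new_index = 0` is dead (overwritten in both branches)
def shuffle_index (n : Int) (p : Int) : Int :=
  (PySem.List.pyRange 0 (p - 1) 1).foldl
    (fun n _ =>
      if PySem.Int.mod n 2 = 0 then PySem.Int.floordiv n 2
      else PySem.Int.floordiv ((2 : Int) ^ p.toNat) 2 + PySem.Int.floordiv (n - 1) 2)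
    n

-- ===== PORT B =====
def shuffle_index_alt (n : Int) (p : Int) : Int :=
  if p ≤ 1 then n
  else  -- half = 1 << (p - 1), inlined
    PySem.Int.floordiv n (2 ^ (p - 1).toNat) + PySem.Int.mod n (2 ^ (p - 1).toNat) * 2

-- ===== PRECONDITION & SPEC =====
def Spec_shuffle_index (n : Int) (p : Int) (out : Int) : Prop := out = shuffle_index_alt n p
instance (n : Int) (p : Int) (out : Int) : Decidable (Spec_shuffle_index n p out) := by unfold Spec_shuffle_index; infer_instance

-- ===== CLAIM (what is proved, stated in full; the proofs are below) =====
def Claim_equal_shuffle_index : Prop := ∀ (n : Int) (p : Int), Dom_shuffle_index n p → Spec_shuffle_index n p (shuffle_index n p)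

-- ===== LEMMAS AND PROOFS =====

-- one shuffle round, in ediv/emod normal form
def pvRound (P : Nat) (m : Int) : Int := m / 2 + m % 2 * 2 ^ (P - 1)

theorem pv_foldl_const {α β : Type} (f : α → α) (l : List β) (a : α) :
    l.foldl (fun a _ => f a) a = f^[l.length] a := by
  induction l generalizing a with
  | nil => rfl
  | cons x xs ih => simp [List.foldl, Function.iterate_succ_apply, ih]

theorem pv_body_eq_round (P : Nat) (hP : 1 ≤ P) (m : Int) :
    (if PySem.Int.mod m 2 = 0 then PySem.Int.floordiv m 2
     else PySem.Int.floordiv ((2 : Int) ^ P) 2 + PySem.Int.floordiv (m - 1) 2)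
      = pvRound P m := by
  have h2 : (0 : Int) < 2 := by norm_num
  have hsz : ((2 : Int) ^ P) / 2 = 2 ^ (P - 1) := by
    have e : (2 : Int) ^ P = 2 ^ (P - 1) * 2 := by
      rw [← pow_succ]; congr 1; omega
    omega
  rw [PySem.Int.mod_eq_emod_of_pos h2, PySem.Int.floordiv_eq_ediv_of_pos h2,
      PySem.Int.floordiv_eq_ediv_of_pos h2, PySem.Int.floordiv_eq_ediv_of_pos h2, hsz]
  unfold pvRound
  by_cases h : m % 2 = 0
  · simp [h]
  · have hm1 : m % 2 = 1 := by omega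
    have hhalf : (m - 1) / 2 = m / 2 := by omega
    rw [if_neg h, hm1, hhalf]; ring

theorem pv_iter_round (P : Nat) : ∀ (k j : Nat), k + j + 1 = P → ∀ n : Int,
    (pvRound P)^[k] n = n / 2 ^ k + n % 2 ^ k * 2 ^ (j + 1) := by
  intro k
  induction k with
  | zero => intro j hj n; simp
  | succ k ih =>
    intro j hj n
    have hij : k + (j + 1) + 1 = P := by omega
    rw [Function.iterate_succ_apply', ih (j + 1) hij n]
    set q := n / 2 ^ k with hq
    set r := n % 2 ^ k with hr
    have hm : q + r * 2 ^ (j + 1 + 1) = q + r * 2 ^ (j + 1) * 2 := by ring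
    unfold pvRound
    have hdiv2 : (q + r * 2 ^ (j + 1) * 2) / 2 = q / 2 + r * 2 ^ (j + 1) := by omega
    have hmod2 : (q + r * 2 ^ (j + 1) * 2) % 2 = q % 2 := by omega
    rw [hm, hdiv2, hmod2]
    have hP1 : P - 1 = k + j + 1 := by omega
    -- n / 2^(k+1) = q / 2
    have hdiv : n / 2 ^ (k + 1) = q / 2 := by
      rw [hq, Int.ediv_ediv_of_nonneg (by positivity), ← pow_succ]
    -- n % 2^(k+1) = r + 2^k * (q % 2)
    have hmod : n % 2 ^ (k + 1) = r + 2 ^ k * (q % 2) := by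
      have e1 : n % 2 ^ (k + 1) = n - 2 ^ k * 2 * (n / 2 ^ k / 2) := by
        rw [Int.emod_def, ← hdiv]
        have : (2 : Int) ^ (k + 1) = 2 ^ k * 2 := by ring
        rw [hdiv, this, hq]
      have e2 : r = n - 2 ^ k * (n / 2 ^ k) := by rw [hr, Int.emod_def]
      have e3 : q % 2 = n / 2 ^ k - 2 * (n / 2 ^ k / 2) := by rw [hq, Int.emod_def]
      rw [e1, e2, e3]; ring
    rw [hdiv, hmod, hP1]
    have hpow : (2 : Int) ^ k * 2 ^ (j + 1) = 2 ^ (k + j + 1) := by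
      rw [← pow_add, Nat.add_assoc]
    calc q / 2 + r * 2 ^ (j + 1) + q % 2 * 2 ^ (k + j + 1)
        = q / 2 + r * 2 ^ (j + 1) + q % 2 * (2 ^ k * 2 ^ (j + 1)) := by rw [hpow]
      _ = q / 2 + (r + 2 ^ k * (q % 2)) * 2 ^ (j + 1) := by ring

-- ===== VERDICT (by name: the statement is the Claim_ definition above) =====
theorem shuffle_index_spec : Claim_equal_shuffle_index := by
  intro n p _
  unfold Spec_shuffle_index shuffle_index shuffle_index_alt
  by_cases hp : p ≤ 1
  · rw [if_pos hp, PySem.List.pyRange_one_eq_nil (by omega)]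
    simp
  · rw [if_neg hp]
    push Not at hp
    set P := p.toNat with hPdef
    have hP2 : 2 ≤ P := by omega
    have hbody : (fun (n : Int) (_ : Int) =>
        if PySem.Int.mod n 2 = 0 then PySem.Int.floordiv n 2
        else PySem.Int.floordiv ((2 : Int) ^ P) 2 + PySem.Int.floordiv (n - 1) 2)
        = fun (n : Int) (_ : Int) => pvRound P n := by
      funext m _; exact pv_body_eq_round P (by omega) m
    rw [hbody, pv_foldl_const (pvRound P), PySem.List.length_pyRange_one]
    have hlen : (p - 1 - 0).toNat = P - 1 := by omega
    rw [hlen, pv_iter_round P (P - 1) 0 (by omega) n]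
    have hpos : (0 : Int) < 2 ^ (P - 1) := by positivity
    have hhalf : (p - 1).toNat = P - 1 := by omega
    rw [hhalf, PySem.Int.floordiv_eq_ediv_of_pos hpos, PySem.Int.mod_eq_emod_of_pos hpos]
    ring
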